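-- pv_equiv track=rewrite | github.com/AdelineMiao/ClinixBot | models/train_model_view.py | _extract_diagnosis
-- ===== SOURCE A (Python) =====
-- def _extract_diagnosis(model_output, prefix):
--     """Extract diagnosis from model output based on prefix"""
--     if not model_output:
--         return "Unknown"
--
--     # Look for the prefix in each line
--     for line in model_output.split('\n'):
--         line = line.strip()
--         if line.startswith(prefix):
--             diagnosis = line[len(prefix):].strip()
--             return diagnosis
--
--     # If no diagnosis found with prefix, return the first non-empty line
--     # or a default value if everything fails
--     for line in model_output.split('\n'):
--         line = line.strip()
--         if line:
--             return line
--
--     return "Unknown"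
-- ===== SOURCE B (Python) =====
-- def _extract_diagnosis(model_output, prefix):
--     """Extract diagnosis from model output based on prefix (single pass)."""
--     if not model_output:
--         return "Unknown"
--     first_nonempty = None
--     for line in model_output.split('\n'):
--         line = line.strip()
--         if line.startswith(prefix):
--             return line[len(prefix):].strip()
--         if line and first_nonempty is None:
--             first_nonempty = line
--     return first_nonempty if first_nonempty is not None else "Unknown"
-- ===== Notes on version B (the rewrite author's own statement) =====
-- stated objective: simpler
-- what changed: Replaces A's two separate scans over the split lines (one for a prefix match, a second full rescan for the first non-empty fallback) with a single pass that records the first non-empty line in a variable while looking for the prefix match.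
import Mathlib
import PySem

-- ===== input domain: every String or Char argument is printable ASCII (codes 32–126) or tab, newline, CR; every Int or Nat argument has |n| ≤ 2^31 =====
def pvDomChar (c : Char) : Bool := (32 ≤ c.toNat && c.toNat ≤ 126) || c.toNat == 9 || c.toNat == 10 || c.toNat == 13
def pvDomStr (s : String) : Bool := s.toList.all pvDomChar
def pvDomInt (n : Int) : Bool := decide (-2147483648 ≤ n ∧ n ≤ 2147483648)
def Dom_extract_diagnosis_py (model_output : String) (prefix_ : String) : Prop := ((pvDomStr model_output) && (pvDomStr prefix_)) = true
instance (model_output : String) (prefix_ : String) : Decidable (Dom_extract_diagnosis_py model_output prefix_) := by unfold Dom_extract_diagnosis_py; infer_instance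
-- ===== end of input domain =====

-- B fuses A's two scans over the split lines into one pass tracking the first non-empty line; objective: simpler.

-- ===== PORT A =====
-- first loop: return the stripped remainder of the first stripped line starting with the prefix
def pvLoopA1 (p : List Char) : List (List Char) → Option (List Char)
  | [] => none
  | l :: ls =>
    let l' := PySem.Chars.strip l
    if PySem.Chars.startswith l' p then
      some (PySem.Chars.strip (PySem.Chars.slice l' (some (PySem.Chars.len p)) none))
    else pvLoopA1 p ls

-- second loop: first non-empty stripped line
def pvLoopA2 : List (List Char) → Option (List Char)
  | [] => none
  | l :: ls =>
    let l' := PySem.Chars.strip l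
    if l' ≠ [] then some l' else pvLoopA2 ls

def extract_diagnosis_py (model_output : String) (prefix_ : String) : String :=
  if model_output = "" then "Unknown"
  else
    let lines := PySem.Chars.splitOn model_output.toList ['\n']
    match pvLoopA1 prefix_.toList lines with
    | some d => String.ofList d
    | none =>
      match pvLoopA2 lines with
      | some l => String.ofList l
      | none => "Unknown"

-- ===== PORT B =====
-- single pass: prefix match returns immediately; otherwise record the first non-empty line
def pvLoopB (p : List Char) : List (List Char) → Option (List Char) → String
  | [], acc => match acc with | some l => String.ofList l | none => "Unknown"
  | l :: ls, acc =>
    let l' := PySem.Chars.strip l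
    if PySem.Chars.startswith l' p then
      String.ofList (PySem.Chars.strip (PySem.Chars.slice l' (some (PySem.Chars.len p)) none))
    else pvLoopB p ls (if l' ≠ [] && acc.isNone then some l' else acc)

def extract_diagnosis_py_alt (model_output : String) (prefix_ : String) : String :=
  if model_output = "" then "Unknown"
  else pvLoopB prefix_.toList (PySem.Chars.splitOn model_output.toList ['\n']) none

-- ===== PRECONDITION & SPEC =====
def Spec_extract_diagnosis_py (model_output : String) (prefix_ : String) (out : String) : Prop := out = extract_diagnosis_py_alt model_output prefix_
instance (model_output : String) (prefix_ : String) (out : String) : Decidable (Spec_extract_diagnosis_py model_output prefix_ out) := by unfold Spec_extract_diagnosis_py; infer_instance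

-- ===== CLAIM (what is proved, stated in full; the proofs are below) =====
def Claim_equal_extract_diagnosis_py : Prop := ∀ (model_output : String) (prefix_ : String), Dom_extract_diagnosis_py model_output prefix_ → Spec_extract_diagnosis_py model_output prefix_ (extract_diagnosis_py model_output prefix_)

-- ===== LEMMAS AND PROOFS =====
-- loop invariant: the one-pass loop equals "first prefix match, else the recorded fallback, else the first non-empty line"
lemma pvLoopB_eq (p : List Char) (ls : List (List Char)) (acc : Option (List Char)) :
    pvLoopB p ls acc =
      match pvLoopA1 p ls with
      | some d => String.ofList d
      | none =>
        match acc with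
        | some l => String.ofList l
        | none =>
          match pvLoopA2 ls with
          | some l => String.ofList l
          | none => "Unknown" := by
  induction ls generalizing acc with
  | nil => cases acc <;> simp [pvLoopB, pvLoopA1, pvLoopA2]
  | cons l ls ih =>
    simp only [pvLoopB, pvLoopA1, pvLoopA2]
    by_cases hs : PySem.Chars.startswith (PySem.Chars.strip l) p = true
    · simp [hs]
    · simp only [hs, if_false, Bool.false_eq_true]
      rw [ih]
      cases acc with
      | some a => simp
      | none =>
        by_cases hne : PySem.Chars.strip l = []
        · simp [hne]
        · simp [hne]

theorem extract_diagnosis_py_eq_alt (model_output : String) (prefix_ : String) :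
    extract_diagnosis_py model_output prefix_ = extract_diagnosis_py_alt model_output prefix_ := by
  unfold extract_diagnosis_py extract_diagnosis_py_alt
  by_cases h : model_output = ""
  · simp [h]
  · simp only [h, if_false]
    rw [pvLoopB_eq]

-- ===== VERDICT (by name: the statement is the Claim_ definition above) =====
theorem extract_diagnosis_py_spec : Claim_equal_extract_diagnosis_py := by
  intro mo p _
  exact extract_diagnosis_py_eq_alt mo p
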